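-- pv_equiv track=rewrite | github.com/N9nGe/QLearning_on_BlackJack | game_sim.py | adjust_for_ace
-- ===== SOURCE A (Python) =====
-- def adjust_for_ace(hand):
--     total = sum(hand)
--     ace_present = 11 in hand
--     while total > 21 and ace_present:
--         # Only replace if there is currently an Ace (11) in hand
--         if 11 in hand:
--             hand[hand.index(11)] = 1  # Adjust Ace from 11 to 1
--         total = sum(hand)
--         ace_present = 11 in hand  # Update ace presence flag
--     return total, ace_present
-- ===== SOURCE B (Python) =====
-- def adjust_for_ace(hand):
--     # Single pass with a running total instead of re-summing/re-scanning per ace.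
--     total = sum(hand)
--     for i in range(len(hand)):
--         if total <= 21:
--             break
--         if hand[i] == 11:
--             hand[i] = 1
--             total -= 10
--     ace_present = 11 in hand
--     return total, ace_present
-- ===== Notes on version B (the rewrite author's own statement) =====
-- stated objective: simpler
-- what changed: Replaces the while-loop that re-sums the hand and re-scans for the first 11 on every iteration with a single left-to-right pass maintaining a running total (subtracting 10 per converted ace), computing the ace flag once at the end.
import Mathlib
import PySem

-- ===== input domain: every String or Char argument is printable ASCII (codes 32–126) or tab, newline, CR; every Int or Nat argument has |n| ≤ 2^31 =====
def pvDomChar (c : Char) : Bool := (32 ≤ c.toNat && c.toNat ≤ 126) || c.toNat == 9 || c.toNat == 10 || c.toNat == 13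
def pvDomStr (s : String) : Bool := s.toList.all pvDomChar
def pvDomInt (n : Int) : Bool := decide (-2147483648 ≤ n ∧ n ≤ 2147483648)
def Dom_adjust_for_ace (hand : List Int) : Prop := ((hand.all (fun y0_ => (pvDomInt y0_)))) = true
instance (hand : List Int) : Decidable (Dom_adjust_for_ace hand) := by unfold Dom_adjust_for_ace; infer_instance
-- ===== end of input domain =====

-- B replaces A's re-sum-and-rescan while-loop by one left-to-right pass with a
-- running total (objective: simpler). Both versions mutate the Python list
-- identically (leftmost aces first); the equivalence proved is about the return value.

-- ===== PORT A =====
-- A-side helper: the mutation inside A's loop body (`if 11 in hand: hand[hand.index(11)] = 1`)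
def pvAStep (hand : List Int) : List Int :=
  if (11 : Int) ∈ hand then
    hand.set ((PySem.List.index? hand (11 : Int)).getD 0) 1
  else hand

-- needed by pvALoop's decreasing_by: each loop body strictly reduces the number of 11s
theorem pvAStep_cons_self (xs : List Int) : pvAStep ((11 : Int) :: xs) = 1 :: xs := by
  simp [pvAStep, List.idxOf?_cons]

theorem pvAStep_cons_of_ne (x : Int) (xs : List Int) (hx : x ≠ 11)
    (hxs : (11 : Int) ∈ xs) : pvAStep (x :: xs) = x :: pvAStep xs := by
  have hk : ∃ k, List.idxOf? (11 : Int) xs = some k := by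
    have h1 := (PySem.List.index?_isSome_iff xs (11 : Int)).mpr hxs
    rw [PySem.List.index?_eq_idxOf?] at h1
    exact Option.isSome_iff_exists.mp h1
  rcases hk with ⟨k, hk⟩
  have hbx : (x == (11 : Int)) = false := by simpa using hx
  simp [pvAStep, List.mem_cons, hxs, List.idxOf?_cons, hbx, hk]

theorem pvAStep_count_lt (hand : List Int) (h : (11 : Int) ∈ hand) :
    (pvAStep hand).count 11 < hand.count 11 := by
  induction hand with
  | nil => cases h
  | cons x xs ih =>
    by_cases hx : x = (11 : Int)
    · subst hx
      rw [pvAStep_cons_self]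
      simp
    · have hxs : (11 : Int) ∈ xs := (List.mem_cons.mp h).resolve_left (fun h1 => hx h1.symm)
      rw [pvAStep_cons_of_ne x xs hx hxs]
      have := ih hxs
      simp only [List.count_cons]
      omega

-- A's while-loop on the state (hand, total, ace_present)
def pvALoop (hand : List Int) (total : Int) (ace : Bool) : List Int × Int × Bool :=
  if 21 < total ∧ ace = true then
    pvALoop (pvAStep hand) (pvAStep hand).sum (decide ((11 : Int) ∈ pvAStep hand))
  else (hand, total, ace)
  termination_by hand.count 11 + (if ace then 1 else 0)
  decreasing_by
    rename_i hcond
    have he : (if ace = true then 1 else 0) = 1 := by rw [hcond.2]; simp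
    by_cases hm : (11 : Int) ∈ hand
    · have h1 := pvAStep_count_lt hand hm
      have h2 : (if decide ((11 : Int) ∈ pvAStep hand) = true then 1 else 0) ≤ 1 := by
        split <;> omega
      omega
    · have hstep : pvAStep hand = hand := by simp [pvAStep, hm]
      simp only [hstep]
      simp [hm, he]

def adjust_for_ace (hand : List Int) : Int × Bool :=
  (pvALoop hand hand.sum (decide ((11 : Int) ∈ hand))).2

-- ===== PORT B =====
-- B-side helper: the single pass — while total > 21, each 11 becomes 1 and total drops by 10
def pvBConvert : List Int → Int → List Int × Int
  | [], total => ([], total)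
  | x :: xs, total =>
    if total ≤ 21 then (x :: xs, total)
    else if x = 11 then
      (1 :: (pvBConvert xs (total - 10)).1, (pvBConvert xs (total - 10)).2)
    else
      (x :: (pvBConvert xs total).1, (pvBConvert xs total).2)

def adjust_for_ace_alt (hand : List Int) : Int × Bool :=
  ((pvBConvert hand hand.sum).2, decide ((11 : Int) ∈ (pvBConvert hand hand.sum).1))

-- ===== PRECONDITION & SPEC =====
def Spec_adjust_for_ace (hand : List Int) (out : Int × Bool) : Prop := out = adjust_for_ace_alt hand
instance (hand : List Int) (out : Int × Bool) : Decidable (Spec_adjust_for_ace hand out) := by unfold Spec_adjust_for_ace; infer_instance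

-- ===== CLAIM (what is proved, stated in full; the proofs are below) =====
def Claim_equal_adjust_for_ace : Prop := ∀ (hand : List Int), Dom_adjust_for_ace hand → Spec_adjust_for_ace hand (adjust_for_ace hand)

-- ===== LEMMAS AND PROOFS =====

theorem pvBConvert_of_le (hand : List Int) (total : Int) (h : total ≤ 21) :
    pvBConvert hand total = (hand, total) := by
  cases hand with
  | nil => rfl
  | cons x xs => simp [pvBConvert, h]

theorem pvBConvert_of_not_mem (hand : List Int) (total : Int) (h : (11 : Int) ∉ hand) :
    pvBConvert hand total = (hand, total) := by
  induction hand generalizing total with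
  | nil => rfl
  | cons x xs ih =>
    have hx : x ≠ (11 : Int) := fun he => h (he ▸ List.mem_cons_self ..)
    have hxs : (11 : Int) ∉ xs := fun he => h (List.mem_cons_of_mem _ he)
    by_cases ht : total ≤ 21
    · simp [pvBConvert, ht]
    · simp [pvBConvert, ht, hx, ih _ hxs]

-- one A-step (replace the first 11, total drops by 10) commutes with B's pass
theorem pvBConvert_step (hand : List Int) (total : Int) (h : 21 < total)
    (hm : (11 : Int) ∈ hand) :
    pvBConvert hand total = pvBConvert (pvAStep hand) (total - 10) := by
  induction hand generalizing total with
  | nil => cases hm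
  | cons x xs ih =>
    have hlt : ¬ total ≤ 21 := not_le.mpr h
    by_cases hx : x = (11 : Int)
    · subst hx
      rw [pvAStep_cons_self]
      by_cases ht : total - 10 ≤ 21
      · simp [pvBConvert, hlt, ht, pvBConvert_of_le xs (total - 10) ht]
      · simp [pvBConvert, hlt, ht]
    · have hxs : (11 : Int) ∈ xs := (List.mem_cons.mp hm).resolve_left (fun h1 => hx h1.symm)
      rw [pvAStep_cons_of_ne x xs hx hxs]
      by_cases ht : total - 10 ≤ 21
      · simp [pvBConvert, hlt, hx, ht, ih total h hxs, pvBConvert_of_le _ _ ht]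
      · simp [pvBConvert, hlt, hx, ht, ih total h hxs]

theorem pvAStep_sum (hand : List Int) (hm : (11 : Int) ∈ hand) :
    (pvAStep hand).sum = hand.sum - 10 := by
  induction hand with
  | nil => cases hm
  | cons x xs ih =>
    by_cases hx : x = (11 : Int)
    · subst hx; rw [pvAStep_cons_self]; simp; ring
    · have hxs : (11 : Int) ∈ xs := (List.mem_cons.mp hm).resolve_left (fun h1 => hx h1.symm)
      rw [pvAStep_cons_of_ne x xs hx hxs]
      simp [ih hxs]; ring

-- A's loop computes B's pass, with the final ace flag read off the final hand
theorem pvALoop_eq_pvBConvert (hand : List Int) (total : Int)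
    (ht : total = hand.sum) :
    pvALoop hand total (decide ((11 : Int) ∈ hand)) =
      ((pvBConvert hand total).1, (pvBConvert hand total).2,
        decide ((11 : Int) ∈ (pvBConvert hand total).1)) := by
  by_cases h21 : total ≤ 21
  · rw [pvALoop, pvBConvert_of_le hand total h21,
      if_neg (fun hc => absurd hc.1 (not_lt.mpr h21))]
  · by_cases hm : (11 : Int) ∈ hand
    · have hcount := pvAStep_count_lt hand hm
      rw [pvALoop, if_pos ⟨by omega, by simpa⟩]
      have hsum : (pvAStep hand).sum = total - 10 := by rw [pvAStep_sum hand hm, ht]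
      rw [hsum, pvALoop_eq_pvBConvert (pvAStep hand) (total - 10) hsum.symm,
        ← pvBConvert_step hand total (by omega) hm]
    · rw [pvALoop, pvBConvert_of_not_mem hand total hm,
        if_neg (fun hc => absurd hc.2 (by simpa using hm))]
  termination_by hand.count 11
  decreasing_by exact pvAStep_count_lt hand hm

-- ===== VERDICT (by name: the statement is the Claim_ definition above) =====
theorem adjust_for_ace_spec : Claim_equal_adjust_for_ace := by
  intro hand _
  unfold Spec_adjust_for_ace adjust_for_ace adjust_for_ace_alt
  rw [pvALoop_eq_pvBConvert hand hand.sum rfl]
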